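-- pv_equiv track=rewrite | github.com/czifumasa/YTM_PlaylistTracker | ytm_api_wrapper.py | group_songs_by_id
-- ===== SOURCE A (Python) =====
-- def group_songs_by_id(songs_list):
--     songs_by_id = {}
--
--     for track in songs_list:
--         if track['videoId'] in songs_by_id:
--             songs_by_id[track['videoId']].append(track)
--         else:
--             songs_by_id[track['videoId']] = [track]
--
--     return songs_by_id
-- ===== SOURCE B (Python) =====
-- def group_songs_by_id(songs_list):
--     # Two-pass: collect distinct videoIds in first-occurrence order, then build each group by filtering.
--     order = list(dict.fromkeys(track['videoId'] for track in songs_list))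
--     return {vid: [track for track in songs_list if track['videoId'] == vid] for vid in order}
-- ===== Notes on version B (the rewrite author's own statement) =====
-- stated objective: alternative
-- what changed: Replaces the single-pass dict accumulation (membership test + append/create per track) by a two-pass strategy: first dedup the videoIds in first-occurrence order, then build each group with one filter comprehension per distinct id.
import Mathlib
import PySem

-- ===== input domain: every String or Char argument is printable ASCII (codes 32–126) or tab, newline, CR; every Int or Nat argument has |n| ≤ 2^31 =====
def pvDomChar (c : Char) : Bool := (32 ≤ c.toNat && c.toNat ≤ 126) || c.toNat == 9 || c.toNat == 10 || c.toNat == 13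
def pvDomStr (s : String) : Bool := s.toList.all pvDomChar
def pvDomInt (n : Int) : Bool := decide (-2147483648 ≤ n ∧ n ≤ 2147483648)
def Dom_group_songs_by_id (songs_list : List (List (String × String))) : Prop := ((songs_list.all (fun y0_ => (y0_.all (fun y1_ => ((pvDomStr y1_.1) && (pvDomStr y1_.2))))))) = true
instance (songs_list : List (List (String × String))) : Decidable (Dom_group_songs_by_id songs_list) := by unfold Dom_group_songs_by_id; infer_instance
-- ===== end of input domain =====

-- B builds the same grouping by deduplicating the videoIds and filtering per id (alternative decomposition, same result).
-- Shared helper: track['videoId'] as a total lookup (Pre_ guarantees the key is present).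
def pvVid (t : List (String × String)) : String :=
  ((PySem.Dict.mk t).get? "videoId").getD ""

-- ===== PORT A =====
def group_songs_by_id (songs_list : List (List (String × String))) : List (String × List (List (String × String))) :=
  (songs_list.foldl (fun d t =>
      let v := pvVid t
      if d.contains v then d.insert v (d.getD v [] ++ [t])
      else d.insert v [t])
    PySem.Dict.empty).items

-- ===== PORT B =====
def group_songs_by_id_alt (songs_list : List (List (String × String))) : List (String × List (List (String × String))) :=
  (PySem.List.dedup (songs_list.map pvVid)).map
    (fun k => (k, songs_list.filter (fun t => pvVid t == k)))

-- Pre_ excludes exactly the tracks without a 'videoId' key, on which A raises KeyError.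
def Pre_group_songs_by_id (songs_list : List (List (String × String))) : Prop :=
  ∀ t ∈ songs_list, (PySem.Dict.mk t).contains "videoId" = true
instance (songs_list : List (List (String × String))) : Decidable (Pre_group_songs_by_id songs_list) := by
  unfold Pre_group_songs_by_id; infer_instance
def pvWitness_group_songs_by_id : (List (List (String × String))) :=
  [[("videoId", "a"), ("title", "x")], [("videoId", "b")], [("videoId", "a")]]

-- ===== PRECONDITION & SPEC =====
def Spec_group_songs_by_id (songs_list : List (List (String × String))) (out : List (String × List (List (String × String)))) : Prop := out = group_songs_by_id_alt songs_list
instance (songs_list : List (List (String × String))) (out : List (String × List (List (String × String)))) : Decidable (Spec_group_songs_by_id songs_list out) := by unfold Spec_group_songs_by_id; infer_instance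

-- ===== CLAIM (what is proved, stated in full; the proofs are below) =====
def Claim_equal_group_songs_by_id : Prop := ∀ (songs_list : List (List (String × String))), Dom_group_songs_by_id songs_list → Pre_group_songs_by_id songs_list → Spec_group_songs_by_id songs_list (group_songs_by_id songs_list)

-- ===== LEMMAS AND PROOFS =====

-- A's branching step is exactly a Dict.modify (append-to-group) step.
theorem stepA_eq_modify :
    (fun (d : PySem.Dict String (List (List (String × String)))) t =>
      let v := pvVid t
      if d.contains v then d.insert v (d.getD v [] ++ [t])
      else d.insert v [t])
    = (fun d t => d.modify (pvVid t) [] (· ++ [t])) := by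
  funext d t
  simp only [PySem.Dict.modify]
  by_cases h : d.contains (pvVid t)
  · simp [h]
  · have hf : d.contains (pvVid t) = false := by simpa using h
    rw [PySem.Dict.getD_of_not_contains d [] hf]
    simp [h]

-- Items of a nodup-keyed dict, read back through getD at each key.
theorem items_eq_map_keys {κ ν : Type} [BEq κ] [LawfulBEq κ]
    (d : PySem.Dict κ ν) (d0 : ν) (h : d.keys.Nodup) :
    d.items = d.keys.map (fun k => (k, d.getD k d0)) := by
  have : d.keys.map (fun k => (k, d.getD k d0))
      = d.items.map (fun p => (p.1, d.getD p.1 d0)) := by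
    simp only [PySem.Dict.keys, List.map_map]; rfl
  rw [this]
  conv_lhs => rw [show d.items = d.items.map id from (List.map_id _).symm]
  apply List.map_congr_left
  intro p hp
  have := PySem.Dict.getD_of_mem_items d (k := p.1) (v := p.2) (by simpa using hp) h d0
  simp [this]

theorem grouped_getD (songs_list : List (List (String × String))) (k : String) :
    (songs_list.foldl (fun d t => d.modify (pvVid t) [] (· ++ [t]))
      (PySem.Dict.empty : PySem.Dict String (List (List (String × String))))).getD k []
    = songs_list.filter (fun t => pvVid t == k) := by
  have hm : songs_list.foldl (fun d t => d.modify (pvVid t) [] (· ++ [t]))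
      (PySem.Dict.empty : PySem.Dict String (List (List (String × String))))
      = (songs_list.map (fun t => (pvVid t, t))).foldl
          (fun d p => d.modify p.1 [] (· ++ [p.2])) PySem.Dict.empty := by
    rw [List.foldl_map]
  rw [hm, PySem.Dict.getD_foldl_modify_append]
  simp [List.filter_map, Function.comp_def]

-- ===== VERDICT (by name: the statement is the Claim_ definition above) =====
theorem group_songs_by_id_spec : Claim_equal_group_songs_by_id := by
  intro songs_list _ _
  unfold Spec_group_songs_by_id group_songs_by_id group_songs_by_id_alt
  rw [stepA_eq_modify]
  set d := songs_list.foldl (fun d t => d.modify (pvVid t) [] (· ++ [t]))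
    (PySem.Dict.empty : PySem.Dict String (List (List (String × String)))) with hd
  have hnodup : d.keys.Nodup := by
    rw [hd]
    exact PySem.Dict.nodup_keys_foldl_modify_key _ _ _ _ _ (by simp [PySem.Dict.keys_empty])
  have hkeys : d.keys = PySem.List.dedup (songs_list.map pvVid) := by
    rw [hd, PySem.Dict.keys_foldl_modify_key, PySem.Dict.keys_empty,
      PySem.List.dedup_eq_ofList, PySem.Set.ofList_eq_foldl]
    rfl
  rw [items_eq_map_keys d [] hnodup, hkeys]
  apply List.map_congr_left
  intro k _
  rw [hd, grouped_getD]
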